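-- pv_equiv track=rewrite | github.com/eskiyerli/revedaRelease | plugins/xyceInterface/prefixHandler.py | parse_output_expression
-- ===== SOURCE A (Python) =====
-- from typing import Tuple, Optional, Dict, Callable, Set
--
-- AC_OPERATIONS = ['db', 'mag', 'ph']
--
-- def parse_output_expression(output: str) -> Tuple[Optional[str], str]:
--     """
--     Parse an output expression to extract prefix and base signal name.
--
--     Args:
--         output (str): Output expression like "db(V(OUT))" or "V(OUT)"
--
--     Returns:
--         Tuple[Optional[str], str]: (prefix, base_signal_name)
--
--     Examples:
--         "db(V(OUT))" -> ("db", "V(OUT)")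
--         "ph(I(M1))" -> ("ph", "I(M1)")
--         "V(OUT)" -> (None, "V(OUT)")
--     """
--     output = output.strip()
--     # Check for prefix pattern: prefix(signal)
--     for prefix in AC_OPERATIONS:
--         prefix_pattern = f"{prefix}("
--         if output.startswith(prefix_pattern) and output.endswith(")"):
--             # Extract the inner expression
--             inner_expression = output[len(prefix_pattern):-1]
--             return prefix, inner_expression
--
--     # No prefix found
--     return None, output
-- ===== SOURCE B (Python) =====
-- AC_OPERATIONS = ['db', 'mag', 'ph']
--
-- def parse_output_expression(output):
--     s = output.strip()
--     if s.endswith(")"):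
--         head, sep, rest = s.partition("(")
--         if sep and head in AC_OPERATIONS:
--             return head, rest[:-1]
--     return None, s
-- ===== Notes on version B (the rewrite author's own statement) =====
-- stated objective: simpler
-- what changed: Replaces A's loop over the three prefix candidates (a startswith test and manual len-based slicing per candidate) by a single partition of the stripped string at its first opening parenthesis followed by one membership test of the head.
import Mathlib
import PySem

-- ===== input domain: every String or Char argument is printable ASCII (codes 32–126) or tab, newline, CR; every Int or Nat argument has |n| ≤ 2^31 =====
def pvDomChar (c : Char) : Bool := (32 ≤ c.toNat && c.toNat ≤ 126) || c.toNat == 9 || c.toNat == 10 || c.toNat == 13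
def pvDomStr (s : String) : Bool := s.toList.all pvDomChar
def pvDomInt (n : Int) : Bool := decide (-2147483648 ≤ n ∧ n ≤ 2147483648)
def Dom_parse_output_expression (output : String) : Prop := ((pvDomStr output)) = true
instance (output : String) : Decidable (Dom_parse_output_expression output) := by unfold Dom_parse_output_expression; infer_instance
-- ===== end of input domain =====

-- B replaces A's loop over the three prefixes (startswith/slice per candidate) by one
-- partition at the first '(' followed by a membership test; objective: simpler/idiomatic.

-- ===== PORT A =====
def pvAcOps : List String := ["db", "mag", "ph"]

-- the 'for prefix in AC_OPERATIONS' loop with its early return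
def pvLoopA (s : String) : List String → Option String × String
  | [] => (none, s)
  | p :: rest =>
      let pat := p ++ "("
      if PySem.Str.startswith s pat && PySem.Str.endswith s ")" then
        (some p, PySem.Str.slice s (some (PySem.Str.len pat)) (some (-1)))
      else pvLoopA s rest

def parse_output_expression (output : String) : Option String × String :=
  let s := PySem.Str.strip output
  pvLoopA s pvAcOps

-- ===== PORT B =====
def parse_output_expression_alt (output : String) : Option String × String :=
  let s := PySem.Str.strip output
  if PySem.Str.endswith s ")" then
    -- s.partition("(") ported exactly: i = index of the FIRST '(' (-1 if absent),
    -- head = s[:i], rest = s[i+1:], and 'sep' is nonempty iff 0 ≤ i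
    let i := PySem.Str.find s "("
    if 0 ≤ i then
      let head := PySem.Str.slice s none (some i)
      let rest := PySem.Str.slice s (some (i + 1)) none
      if pvAcOps.contains head then
        (some head, PySem.Str.slice rest none (some (-1)))   -- rest[:-1]
      else (none, s)
    else (none, s)
  else (none, s)

-- ===== PRECONDITION & SPEC =====
def Spec_parse_output_expression (output : String) (out : Option String × String) : Prop := out = parse_output_expression_alt output
instance (output : String) (out : Option String × String) : Decidable (Spec_parse_output_expression output out) := by unfold Spec_parse_output_expression; infer_instance

-- ===== CLAIM (what is proved, stated in full; the proofs are below) =====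
def Claim_equal_parse_output_expression : Prop := ∀ (output : String), Dom_parse_output_expression output → Spec_parse_output_expression output (parse_output_expression output)

-- ===== LEMMAS AND PROOFS =====

-- the position of the first '(' when the string starts with one of the three prefixes
lemma pvFind_cons_db (r : List Char) : PySem.Chars.find ('d' :: 'b' :: '(' :: r) ['('] = 2 := by
  simp [PySem.Chars.find, PySem.Chars.find.go, List.isPrefixOf]

lemma pvFind_cons_mag (r : List Char) : PySem.Chars.find ('m' :: 'a' :: 'g' :: '(' :: r) ['('] = 3 := by
  simp [PySem.Chars.find, PySem.Chars.find.go, List.isPrefixOf]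

lemma pvFind_cons_ph (r : List Char) : PySem.Chars.find ('p' :: 'h' :: '(' :: r) ['('] = 2 := by
  simp [PySem.Chars.find, PySem.Chars.find.go, List.isPrefixOf]

-- core equality, for the already-stripped string
lemma pvCore (s : String) : pvLoopA s pvAcOps =
    (if PySem.Str.endswith s ")" then
      let i := PySem.Str.find s "("
      if 0 ≤ i then
        let head := PySem.Str.slice s none (some i)
        let rest := PySem.Str.slice s (some (i + 1)) none
        if pvAcOps.contains head then
          (some head, PySem.Str.slice rest none (some (-1)))
        else (none, s)
      else (none, s)
    else (none, s)) := by
  by_cases hE : PySem.Str.endswith s ")" = true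
  · by_cases h1 : PySem.Str.startswith s ("db" ++ "(") = true
    · obtain ⟨r, hr⟩ : ('d'::'b'::'('::([] : List Char)) <+: s.toList := by
        have := (PySem.Chars.startswith_iff s.toList ("db" ++ "(").toList).mp (by simpa using h1)
        simpa using this
      have hE' : PySem.Chars.endswith ('d'::'b'::'('::r) [')'] = true := by
        have := hE; simp only [PySem.Str.endswith_eq, ← hr] at this; simpa using this
      simp [pvLoopA, pvAcOps, hE', PySem.Str.slice, PySem.Str.len, PySem.Str.find,
        ← hr, pvFind_cons_db, PySem.Chars.slice, PySem.List.slice,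
        PySem.Chars.startswith, List.isPrefixOf]
    · by_cases h2 : PySem.Str.startswith s ("mag" ++ "(") = true
      · obtain ⟨r, hr⟩ : ('m'::'a'::'g'::'('::([] : List Char)) <+: s.toList := by
          have := (PySem.Chars.startswith_iff s.toList ("mag" ++ "(").toList).mp (by simpa using h2)
          simpa using this
        have hE' : PySem.Chars.endswith ('m'::'a'::'g'::'('::r) [')'] = true := by
          have := hE; simp only [PySem.Str.endswith_eq, ← hr] at this; simpa using this
        simp [pvLoopA, pvAcOps, hE', PySem.Str.slice, PySem.Str.len, PySem.Str.find,
          ← hr, pvFind_cons_mag, PySem.Chars.slice, PySem.List.slice,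
          PySem.Chars.startswith, List.isPrefixOf]
      · by_cases h3 : PySem.Str.startswith s ("ph" ++ "(") = true
        · obtain ⟨r, hr⟩ : ('p'::'h'::'('::([] : List Char)) <+: s.toList := by
            have := (PySem.Chars.startswith_iff s.toList ("ph" ++ "(").toList).mp (by simpa using h3)
            simpa using this
          have hE' : PySem.Chars.endswith ('p'::'h'::'('::r) [')'] = true := by
            have := hE; simp only [PySem.Str.endswith_eq, ← hr] at this; simpa using this
          simp [pvLoopA, pvAcOps, hE', PySem.Str.slice, PySem.Str.len, PySem.Str.find,
            ← hr, pvFind_cons_ph, PySem.Chars.slice, PySem.List.slice,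
            PySem.Chars.startswith, List.isPrefixOf]
        · -- none of the three prefixes matches: both sides give (none, s)
          have h1' : PySem.Chars.startswith s.toList ['d','b','('] = false := by simpa using h1
          have h2' : PySem.Chars.startswith s.toList ['m','a','g','('] = false := by simpa using h2
          have h3' : PySem.Chars.startswith s.toList ['p','h','('] = false := by simpa using h3
          have hA : pvLoopA s pvAcOps = (none, s) := by
            simp [pvLoopA, pvAcOps, h1', h2', h3']
          rw [hA]
          simp only [hE, if_true]
          by_cases hI : (0 : Int) ≤ PySem.Str.find s "("
          · by_cases hH : pvAcOps.contains (PySem.Str.slice s none (some (PySem.Str.find s "("))) = true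
            · -- impossible: head ∈ ops together with '(' at the find position would
              -- make one of the three startswith tests true
              exfalso
              set i := PySem.Str.find s "(" with hidef
              have hfind : PySem.Chars.find s.toList ['('] = i := by
                simp [hidef, PySem.Str.find]
              have hspec := PySem.Chars.find_spec (s := s.toList) (sub := ['(']) (by rw [hfind]; exact hI)
              obtain ⟨t, ht⟩ := hspec.1
              rw [hfind] at ht
              have hhead : (PySem.Str.slice s none (some i)).toList = s.toList.take i.toNat := by
                simp [PySem.Str.slice, PySem.Chars.slice, PySem.List.slice, hI]
              have ht' : ('(' :: t) = List.drop i.toNat s.toList := ht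
              have hdec : s.toList = s.toList.take i.toNat ++ ('(' :: t) := by
                rw [ht']; exact (List.take_append_drop _ _).symm
              have hcases : PySem.Str.slice s none (some i) = "db" ∨
                  PySem.Str.slice s none (some i) = "mag" ∨
                  PySem.Str.slice s none (some i) = "ph" := by
                simpa [pvAcOps] using hH
              rcases hcases with hc | hc | hc
              · apply h1
                have : s.toList.take i.toNat = ['d','b'] := by rw [← hhead, hc]; decide
                rw [this] at hdec
                simp only [PySem.Str.startswith_eq]
                rw [PySem.Chars.startswith_iff]
                exact ⟨t, by rw [hdec]; simp⟩
              · apply h2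
                have : s.toList.take i.toNat = ['m','a','g'] := by rw [← hhead, hc]; decide
                rw [this] at hdec
                simp only [PySem.Str.startswith_eq]
                rw [PySem.Chars.startswith_iff]
                exact ⟨t, by rw [hdec]; simp⟩
              · apply h3
                have : s.toList.take i.toNat = ['p','h'] := by rw [← hhead, hc]; decide
                rw [this] at hdec
                simp only [PySem.Str.startswith_eq]
                rw [PySem.Chars.startswith_iff]
                exact ⟨t, by rw [hdec]; simp⟩
            · have hI' : (0 : Int) ≤ PySem.Chars.find s.toList ['('] := by
                simpa [PySem.Str.find] using hI
              have hH' : ¬(PySem.Str.slice s none (some (PySem.Chars.find s.toList ['('])) = "db" ∨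
                  PySem.Str.slice s none (some (PySem.Chars.find s.toList ['('])) = "mag" ∨
                  PySem.Str.slice s none (some (PySem.Chars.find s.toList ['('])) = "ph") := by
                simpa [pvAcOps, PySem.Str.find] using hH
              simp [hI', pvAcOps, hH']
          · have hI' : ¬ (0 : Int) ≤ PySem.Chars.find s.toList ['('] := by
              simpa [PySem.Str.find] using hI
            simp [hI']
  · have hE' : PySem.Chars.endswith s.toList [')'] = false := by simpa using hE
    simp [pvLoopA, pvAcOps, hE']

-- ===== VERDICT (by name: the statement is the Claim_ definition above) =====
theorem parse_output_expression_spec : Claim_equal_parse_output_expression := by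
  intro output _
  show _ = _
  unfold parse_output_expression parse_output_expression_alt
  exact pvCore (PySem.Str.strip output)
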